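-- pv_equiv track=rewrite | github.com/Yogendiran-SP/Python_for_Data_Science | Week_1/Day_1-3/Fibonacci_Series_Generator.py | sum_within_n
-- ===== SOURCE A (Python) =====
-- def sum_within_n(n):
--     a,b=0,1
--     s=(a+b)
--     while True:
--         s+=(a+b)
--         if s>n:
--             s-=(a+b)
--             break
--         a,b=b,a+b
--     return s
-- ===== SOURCE B (Python) =====
-- def sum_within_n(n):
--     # Largest Fibonacci number f (from 2,3,5,8,...) with f <= n+1; answer is f-1.
--     # Uses sum(fib(1..k)) = fib(k+2) - 1, so A's running total is always fib-1.
--     x, y = 2, 3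
--     while y <= n + 1:
--         x, y = y, x + y
--     return x - 1
-- ===== Notes on version B (the rewrite author's own statement) =====
-- stated objective: simpler
-- what changed: B drops A's running sum with its add-then-undo step and instead advances a plain Fibonacci pair, returning (largest Fibonacci value <= n+1) - 1, via the identity that A's accumulated total is always a Fibonacci number minus one.
import Mathlib
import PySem

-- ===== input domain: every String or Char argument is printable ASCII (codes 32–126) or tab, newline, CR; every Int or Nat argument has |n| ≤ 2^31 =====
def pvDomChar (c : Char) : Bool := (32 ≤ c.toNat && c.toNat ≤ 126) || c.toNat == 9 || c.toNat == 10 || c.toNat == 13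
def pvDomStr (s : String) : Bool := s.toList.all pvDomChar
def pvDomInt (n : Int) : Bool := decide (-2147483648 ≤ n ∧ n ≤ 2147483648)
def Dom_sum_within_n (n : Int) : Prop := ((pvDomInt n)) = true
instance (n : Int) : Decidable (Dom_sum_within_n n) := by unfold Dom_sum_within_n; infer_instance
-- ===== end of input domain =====

-- B replaces A's running total and its add-then-undo step with a bare Fibonacci pair
-- and the identity total = fib − 1 (objective: simpler).

-- ===== PORT A =====
-- A's while-True loop: state (a, b, s); each pass adds a+b to s, breaks (undoing the
-- add) once s would exceed n. The invariant arguments (0 ≤ a, 1 ≤ b) only justify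
-- termination; the computation is A's step for step.
def sumLoopA (n a b s : Int) (ha : 0 ≤ a) (hb : 1 ≤ b) : Int :=
  if s + (a + b) > n then s
  else sumLoopA n b (a + b) (s + (a + b)) (by omega) (by omega)
termination_by (n + 1 - s).toNat
decreasing_by omega

def sum_within_n (n : Int) : Int := sumLoopA n 0 1 1 (by norm_num) (by norm_num)

-- ===== PORT B =====
-- B's while loop: advance the Fibonacci pair (x, y) while y ≤ n+1, return x - 1.
def sumLoopB (n x y : Int) (hx : 2 ≤ x) (hy : x < y) : Int :=
  if y ≤ n + 1 then sumLoopB n y (x + y) (by omega) (by omega)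
  else x - 1
termination_by (n + 2 - x).toNat
decreasing_by omega

def sum_within_n_alt (n : Int) : Int := sumLoopB n 2 3 (by norm_num) (by norm_num)

-- ===== PRECONDITION & SPEC =====
def Spec_sum_within_n (n : Int) (out : Int) : Prop := out = sum_within_n_alt n
instance (n : Int) (out : Int) : Decidable (Spec_sum_within_n n out) := by unfold Spec_sum_within_n; infer_instance

-- ===== CLAIM (what is proved, stated in full; the proofs are below) =====
def Claim_equal_sum_within_n : Prop := ∀ (n : Int), Dom_sum_within_n n → Spec_sum_within_n n (sum_within_n n)

-- ===== LEMMAS AND PROOFS =====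

-- loopB only depends on the numeric arguments (proof irrelevance).
theorem sumLoopB_congr (n x y x' y' : Int) (hx : 2 ≤ x) (hy : x < y)
    (hx' : 2 ≤ x') (hy' : x' < y') (e1 : x = x') (e2 : y = y') :
    sumLoopB n x y hx hy = sumLoopB n x' y' hx' hy' := by
  subst e1; subst e2; rfl

-- Invariant linking A's state (a, b, s) to B's state (a+2b, 2a+3b):
-- s = a + 2b − 1, both loops test the same condition, and the states advance in step.
theorem sumLoop_eq (k : ℕ) : ∀ (n a b s : Int) (ha : 0 ≤ a) (hb : 1 ≤ b)
    (hx : 2 ≤ a + 2*b) (hy : a + 2*b < 2*a + 3*b),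
    s = a + 2*b - 1 → (n + 1 - s).toNat ≤ k →
    sumLoopA n a b s ha hb = sumLoopB n (a + 2*b) (2*a + 3*b) hx hy := by
  induction k with
  | zero =>
    intro n a b s ha hb hx hy hs hk
    rw [sumLoopA, sumLoopB]
    have hcond : s + (a + b) > n := by omega
    rw [if_pos hcond, if_neg (by omega)]
    omega
  | succ k ih =>
    intro n a b s ha hb hx hy hs hk
    rw [sumLoopA, sumLoopB]
    by_cases hcond : s + (a + b) > n
    · rw [if_pos hcond, if_neg (by omega)]
      omega
    · rw [if_neg hcond, if_pos (by omega)]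
      have h := ih n b (a + b) (s + (a + b)) (by omega) (by omega)
        (by omega) (by omega) (by omega) (by omega)
      rw [h]
      exact sumLoopB_congr _ _ _ _ _ _ _ _ _ (by ring) (by ring)

-- ===== VERDICT (by name: the statement is the Claim_ definition above) =====
theorem sum_within_n_spec : Claim_equal_sum_within_n := by
  intro n _
  unfold Spec_sum_within_n sum_within_n sum_within_n_alt
  have h := sumLoop_eq (n + 1 - 1).toNat n 0 1 1 (by norm_num) (by norm_num)
    (by norm_num) (by norm_num) (by norm_num) (le_refl _)
  rw [h]
  exact sumLoopB_congr _ _ _ _ _ _ _ _ _ (by norm_num) (by norm_num)
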